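-- pv_equiv track=rewrite | github.com/ALTA-DE1-ARIFIN-11APRIL2001/Algo-DS-Part2 | problem3/main.py | playing_domino
-- ===== SOURCE A (Python) =====
-- def playing_domino(hand, deck):
--     matching_cards = []
--
--     for card in hand:
--         if card[0] == deck[0] or card[1] == deck[0]:
--             matching_cards.append(card)
--
--     if not matching_cards:
--         return []
--
--     max_sum = max([sum(card) for card in matching_cards])
--     recommended_cards = [card for card in matching_cards if sum(card) == max_sum]
--
--     if recommended_cards:
--         return recommended_cards
--     else:
--         return []
-- ===== SOURCE B (Python) =====
-- def playing_domino(hand, deck):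
--     best_sum = None
--     best = []
--     for card in hand:
--         if card[0] == deck[0] or card[1] == deck[0]:
--             s = card[0] + card[1]
--             if best_sum is None or s > best_sum:
--                 best_sum = s
--                 best = [card]
--             elif s == best_sum:
--                 best.append(card)
--     return best
-- ===== Notes on version B (the rewrite author's own statement) =====
-- stated objective: alternative
-- what changed: Replaces A's three passes (filter matches, max of sums, filter by max sum) with one loop over hand that maintains the best pip sum and the list of tied cards as it goes.
import Mathlib
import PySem

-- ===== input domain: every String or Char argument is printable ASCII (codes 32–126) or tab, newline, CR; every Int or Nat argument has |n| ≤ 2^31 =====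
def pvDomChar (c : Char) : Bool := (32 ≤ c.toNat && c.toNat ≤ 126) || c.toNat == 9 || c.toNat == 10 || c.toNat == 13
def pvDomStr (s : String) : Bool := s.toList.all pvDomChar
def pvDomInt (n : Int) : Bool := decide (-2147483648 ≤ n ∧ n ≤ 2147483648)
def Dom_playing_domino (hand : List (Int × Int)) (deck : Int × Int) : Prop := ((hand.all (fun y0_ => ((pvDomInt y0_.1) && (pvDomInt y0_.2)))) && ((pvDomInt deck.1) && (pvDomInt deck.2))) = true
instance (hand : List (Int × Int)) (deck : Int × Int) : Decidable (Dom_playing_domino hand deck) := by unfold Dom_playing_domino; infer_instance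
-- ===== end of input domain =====

-- B replaces A's three passes (collect matches, max of sums, filter by max sum) with one
-- loop maintaining the best sum and the list of tied cards (objective: alternative).

-- ===== PORT A =====
def playing_domino (hand : List (Int × Int)) (deck : Int × Int) : List (Int × Int) :=
  let matching_cards := hand.foldl
    (fun acc card => if card.1 == deck.1 || card.2 == deck.1 then acc ++ [card] else acc) []
  if matching_cards = [] then []
  else
    match PySem.List.max? (matching_cards.map (fun card => card.1 + card.2)) (fun y => y) with
    | none => []  -- unreachable: matching_cards ≠ []
    | some max_sum =>
      let recommended_cards := matching_cards.filter (fun card => card.1 + card.2 == max_sum)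
      if recommended_cards = [] then [] else recommended_cards

-- ===== PORT B =====
def pdStep (deck : Int × Int) (st : Option Int × List (Int × Int)) (card : Int × Int) :
    Option Int × List (Int × Int) :=
  if card.1 == deck.1 || card.2 == deck.1 then
    let s := card.1 + card.2
    match st.1 with
    | none => (some s, [card])
    | some b =>
      if s > b then (some s, [card])
      else if s == b then (some b, st.2 ++ [card])
      else st
  else st

def playing_domino_alt (hand : List (Int × Int)) (deck : Int × Int) : List (Int × Int) :=
  (hand.foldl (pdStep deck) (none, [])).2

-- ===== PRECONDITION & SPEC =====
def Spec_playing_domino (hand : List (Int × Int)) (deck : Int × Int) (out : List (Int × Int)) : Prop := out = playing_domino_alt hand deck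
instance (hand : List (Int × Int)) (deck : Int × Int) (out : List (Int × Int)) : Decidable (Spec_playing_domino hand deck out) := by unfold Spec_playing_domino; infer_instance

-- ===== CLAIM (what is proved, stated in full; the proofs are below) =====
def Claim_equal_playing_domino : Prop := ∀ (hand : List (Int × Int)) (deck : Int × Int), Dom_playing_domino hand deck → Spec_playing_domino hand deck (playing_domino hand deck)

-- ===== LEMMAS AND PROOFS =====

theorem filter_match_cons_pos (deck c : Int × Int) (t : List (Int × Int))
    (h : (c.1 == deck.1 || c.2 == deck.1) = true) :
    List.filter (fun card => card.1 == deck.1 || card.2 == deck.1) (c :: t)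
      = c :: List.filter (fun card => card.1 == deck.1 || card.2 == deck.1) t := by
  simp [h]

theorem filter_match_cons_neg (deck c : Int × Int) (t : List (Int × Int))
    (h : ¬ (c.1 == deck.1 || c.2 == deck.1) = true) :
    List.filter (fun card => card.1 == deck.1 || card.2 == deck.1) (c :: t)
      = List.filter (fun card => card.1 == deck.1 || card.2 == deck.1) t := by
  simp only [List.filter_cons, if_neg h]

theorem filter_sum_cons_pos (M : Int) (c : Int × Int) (t : List (Int × Int))
    (h : c.1 + c.2 = M) :
    List.filter (fun x => x.1 + x.2 == M) (c :: t) = c :: List.filter (fun x => x.1 + x.2 == M) t := by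
  simp [h]

theorem filter_sum_cons_neg (M : Int) (c : Int × Int) (t : List (Int × Int))
    (h : ¬ c.1 + c.2 = M) :
    List.filter (fun x => x.1 + x.2 == M) (c :: t) = List.filter (fun x => x.1 + x.2 == M) t := by
  simp [h]


-- A's collection loop is filtering.
theorem matchFold (deck : Int × Int) (hand : List (Int × Int)) (acc : List (Int × Int)) :
    hand.foldl (fun acc card => if card.1 == deck.1 || card.2 == deck.1 then acc ++ [card] else acc) acc
      = acc ++ hand.filter (fun card => card.1 == deck.1 || card.2 == deck.1) := by
  induction hand generalizing acc with
  | nil => simp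
  | cons c t ih =>
    rw [List.foldl_cons, List.filter_cons]
    by_cases h : (c.1 == deck.1 || c.2 == deck.1) = true
    · rw [if_pos h, if_pos h, ih]
      simp
    · rw [if_neg h, if_neg h, ih]

-- B's loop from a 'some' state: the tracked sum becomes the running max over the
-- matching cards' sums, and the list collects the ties at that max, in order.
theorem altFoldSome (deck : Int × Int) (l : List (Int × Int)) (b : Int) (lst : List (Int × Int)) :
    l.foldl (pdStep deck) (some b, lst)
      = (some (((l.filter (fun card => card.1 == deck.1 || card.2 == deck.1)).map (fun c => c.1 + c.2)).foldl max b),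
         (if b = ((l.filter (fun card => card.1 == deck.1 || card.2 == deck.1)).map (fun c => c.1 + c.2)).foldl max b then lst else [])
           ++ (l.filter (fun card => card.1 == deck.1 || card.2 == deck.1)).filter
                (fun c => c.1 + c.2 == ((l.filter (fun card => card.1 == deck.1 || card.2 == deck.1)).map (fun c => c.1 + c.2)).foldl max b)) := by
  induction l generalizing b lst with
  | nil => simp
  | cons c t ih =>
    rw [List.foldl_cons]
    by_cases h : (c.1 == deck.1 || c.2 == deck.1) = true
    · rw [filter_match_cons_pos deck c t h, List.map_cons, List.foldl_cons]
      rcases lt_trichotomy (c.1 + c.2) b with hlt | heq | hgt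
      · -- smaller sum: state unchanged, card not among the ties
        have hM := (PySem.List.le_foldl_max ((t.filter (fun card => card.1 == deck.1 || card.2 == deck.1)).map (fun c => c.1 + c.2)) b).1
        have hstep : pdStep deck (some b, lst) c = (some b, lst) := by
          simp only [pdStep, h, if_pos]
          rw [if_neg (by omega), if_neg (by simp only [beq_iff_eq]; omega)]
        rw [hstep, max_eq_left (le_of_lt hlt), ih,
          filter_sum_cons_neg _ _ _ (by omega)]
      · -- equal sum: card appended to the ties
        have hM := (PySem.List.le_foldl_max ((t.filter (fun card => card.1 == deck.1 || card.2 == deck.1)).map (fun c => c.1 + c.2)) b).1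
        have hstep : pdStep deck (some b, lst) c = (some b, lst ++ [c]) := by
          simp only [pdStep, h, if_pos]
          rw [if_neg (by omega), if_pos (by simp only [beq_iff_eq]; omega)]
        rw [hstep, max_eq_left (le_of_eq heq), ih]
        by_cases hb : b = ((t.filter (fun card => card.1 == deck.1 || card.2 == deck.1)).map (fun c => c.1 + c.2)).foldl max b
        · rw [if_pos hb, if_pos hb, filter_sum_cons_pos _ _ _ (by omega)]
          simp
        · rw [if_neg hb, if_neg hb, filter_sum_cons_neg _ _ _ (by omega)]
      · -- larger sum: best restarts at this card
        have hstep : pdStep deck (some b, lst) c = (some (c.1 + c.2), [c]) := by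
          simp only [pdStep, h, if_pos]
          rw [if_pos (by omega)]
        have hmx : max b (c.1 + c.2) = c.1 + c.2 := max_eq_right (le_of_lt hgt)
        rw [hstep, hmx, ih]
        have hM := (PySem.List.le_foldl_max ((t.filter (fun card => card.1 == deck.1 || card.2 == deck.1)).map (fun c => c.1 + c.2)) (c.1 + c.2)).1
        rw [if_neg (show ¬ b = _ by omega)]
        by_cases hs : c.1 + c.2 = ((t.filter (fun card => card.1 == deck.1 || card.2 == deck.1)).map (fun c => c.1 + c.2)).foldl max (c.1 + c.2)
        · rw [if_pos hs, filter_sum_cons_pos _ _ _ (by omega)]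
          simp
        · rw [if_neg hs, filter_sum_cons_neg _ _ _ (by omega)]
    · have hstep : pdStep deck (some b, lst) c = (some b, lst) := by
        simp [pdStep, h]
      rw [hstep, filter_match_cons_neg deck c t h, ih]

-- B's whole loop: empty when nothing matches, otherwise the ties at the max sum, in order.
theorem altFoldNone (deck : Int × Int) (l : List (Int × Int)) :
    l.foldl (pdStep deck) ((none : Option Int), ([] : List (Int × Int)))
      = match l.filter (fun card => card.1 == deck.1 || card.2 == deck.1) with
        | [] => (none, [])
        | c :: t => (some ((t.map (fun c => c.1 + c.2)).foldl max (c.1 + c.2)),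
            (c :: t).filter (fun x => x.1 + x.2 == (t.map (fun c => c.1 + c.2)).foldl max (c.1 + c.2))) := by
  induction l with
  | nil => simp
  | cons c t ih =>
    rw [List.foldl_cons]
    by_cases h : (c.1 == deck.1 || c.2 == deck.1) = true
    · have hstep : pdStep deck (none, []) c = (some (c.1 + c.2), [c]) := by
        simp [pdStep, h]
      rw [hstep, altFoldSome, filter_match_cons_pos deck c t h]
      show _ = (some (((t.filter (fun card => card.1 == deck.1 || card.2 == deck.1)).map (fun c => c.1 + c.2)).foldl max (c.1 + c.2)),
        (c :: t.filter (fun card => card.1 == deck.1 || card.2 == deck.1)).filter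
          (fun x => x.1 + x.2 == ((t.filter (fun card => card.1 == deck.1 || card.2 == deck.1)).map (fun c => c.1 + c.2)).foldl max (c.1 + c.2)))
      have hM := (PySem.List.le_foldl_max ((t.filter (fun card => card.1 == deck.1 || card.2 == deck.1)).map (fun c => c.1 + c.2)) (c.1 + c.2)).1
      by_cases hs : c.1 + c.2 = ((t.filter (fun card => card.1 == deck.1 || card.2 == deck.1)).map (fun c => c.1 + c.2)).foldl max (c.1 + c.2)
      · rw [if_pos hs, filter_sum_cons_pos _ _ _ (by omega)]
        simp
      · rw [if_neg hs, filter_sum_cons_neg _ _ _ (by omega)]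
        simp
    · have hstep : pdStep deck (none, []) c = (none, []) := by
        simp [pdStep, h]
      rw [hstep, filter_match_cons_neg deck c t h, ih]

-- ===== VERDICT (by name: the statement is the Claim_ definition above) =====
theorem playing_domino_spec : Claim_equal_playing_domino := by
  intro hand deck _
  unfold Spec_playing_domino playing_domino playing_domino_alt
  rw [matchFold, List.nil_append, altFoldNone]
  cases hfl : hand.filter (fun card => card.1 == deck.1 || card.2 == deck.1) with
  | nil => simp
  | cons c t =>
    rw [if_neg (by simp)]
    rw [List.map_cons, PySem.List.max?_id_cons]
    -- the max is attained, so the recommended list is nonempty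
    have hrec : (c :: t).filter
        (fun card => card.1 + card.2 == (t.map (fun c => c.1 + c.2)).foldl max (c.1 + c.2)) ≠ [] := by
      rcases PySem.List.foldl_max_mem (t.map (fun c => c.1 + c.2)) (c.1 + c.2) with h1 | h1
      · intro hnil
        have : c ∈ (c :: t).filter
            (fun card => card.1 + card.2 == (t.map (fun c => c.1 + c.2)).foldl max (c.1 + c.2)) := by
          apply List.mem_filter.2
          exact ⟨List.mem_cons_self, by simp [h1]⟩
        rw [hnil] at this
        exact absurd this (List.not_mem_nil)
      · rcases List.mem_map.1 h1 with ⟨x, hx, hsx⟩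
        intro hnil
        have : x ∈ (c :: t).filter
            (fun card => card.1 + card.2 == (t.map (fun c => c.1 + c.2)).foldl max (c.1 + c.2)) := by
          apply List.mem_filter.2
          exact ⟨List.mem_cons_of_mem _ hx, by simp [hsx]⟩
        rw [hnil] at this
        exact absurd this (List.not_mem_nil)
    show (if List.filter (fun card => card.1 + card.2 == List.foldl max (c.1 + c.2) (List.map (fun card => card.1 + card.2) t)) (c :: t) = []
        then ([] : List (Int × Int))
        else List.filter (fun card => card.1 + card.2 == List.foldl max (c.1 + c.2) (List.map (fun card => card.1 + card.2) t)) (c :: t))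
      = List.filter (fun card => card.1 + card.2 == List.foldl max (c.1 + c.2) (List.map (fun card => card.1 + card.2) t)) (c :: t)
    rw [if_neg hrec]
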